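-- pv_equiv track=rewrite | github.com/ClaudioCarvalhoo/you-can-accomplish-anything-with-just-enough-determination-and-a-little-bit-of-luck | problems/LC1638.py | diffByOne
-- ===== SOURCE A (Python) =====
-- def diffByOne(s1, s2):
--     if len(s1) != len(s2):
--         return False
--     ok = False
--     for i in range(len(s2)):
--         if s1[i] != s2[i]:
--             if ok:
--                 return False
--             else:
--                 ok = True
--     return ok
-- ===== SOURCE B (Python) =====
-- def diffByOne(s1, s2):
--     if len(s1) != len(s2):
--         return False
--     i = next((i for i in range(len(s1)) if s1[i] != s2[i]), None)
--     if i is None: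
--         return False
--     return s1[i + 1:] == s2[i + 1:]
-- ===== Notes on version B (the rewrite author's own statement) =====
-- stated objective: alternative
-- what changed: Replaces the flag-carrying single loop with a two-phase approach: locate the first mismatching index, then decide the result by one suffix-equality (slice) comparison.
import Mathlib
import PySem

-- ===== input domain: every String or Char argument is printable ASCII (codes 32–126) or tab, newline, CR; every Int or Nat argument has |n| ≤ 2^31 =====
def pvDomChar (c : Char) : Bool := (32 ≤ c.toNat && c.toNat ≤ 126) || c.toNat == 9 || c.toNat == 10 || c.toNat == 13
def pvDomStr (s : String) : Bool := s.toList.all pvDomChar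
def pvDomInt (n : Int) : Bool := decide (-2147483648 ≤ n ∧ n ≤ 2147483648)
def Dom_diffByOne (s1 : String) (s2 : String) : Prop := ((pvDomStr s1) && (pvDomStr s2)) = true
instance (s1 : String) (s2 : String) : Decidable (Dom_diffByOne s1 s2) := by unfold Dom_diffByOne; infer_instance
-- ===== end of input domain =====

-- B locates the first mismatching index then compares the two suffixes once,
-- instead of A's flag-carrying single loop; same cost (objective: alternative).

-- ===== PORT A =====
-- A's loop over i in range(len(s2)) with equal lengths: walk both char lists in step,
-- carrying the 'ok' flag; the early 'return False' is the literal `false` branch.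
def pvALoop : List Char → List Char → Bool → Bool
  | c1 :: t1, c2 :: t2, ok =>
      if c1 ≠ c2 then
        if ok then false else pvALoop t1 t2 true
      else pvALoop t1 t2 ok
  | _, _, ok => ok

def diffByOne (s1 : String) (s2 : String) : Bool :=
  if s1.toList.length ≠ s2.toList.length then false
  else pvALoop s1.toList s2.toList false

-- ===== PORT B =====
-- first index where the two lists differ (Source B's `next(..., None)`)
def pvFirstMismatch : List Char → List Char → Option Nat
  | c1 :: t1, c2 :: t2 =>
      if c1 ≠ c2 then some 0 else (pvFirstMismatch t1 t2).map (· + 1)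
  | _, _ => none

def diffByOne_alt (s1 : String) (s2 : String) : Bool :=
  if s1.toList.length ≠ s2.toList.length then false
  else
    match pvFirstMismatch s1.toList s2.toList with
    | none => false
    | some i => decide (s1.toList.drop (i + 1) = s2.toList.drop (i + 1))

-- ===== PRECONDITION & SPEC =====
def Spec_diffByOne (s1 : String) (s2 : String) (out : Bool) : Prop := out = diffByOne_alt s1 s2
instance (s1 : String) (s2 : String) (out : Bool) : Decidable (Spec_diffByOne s1 s2 out) := by unfold Spec_diffByOne; infer_instance

-- ===== CLAIM (what is proved, stated in full; the proofs are below) =====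
def Claim_equal_diffByOne : Prop := ∀ (s1 : String) (s2 : String), Dom_diffByOne s1 s2 → Spec_diffByOne s1 s2 (diffByOne s1 s2)

-- ===== LEMMAS AND PROOFS =====

-- with the flag already set, A's loop returns true iff the remainders are equal
theorem pvALoop_true (l1 l2 : List Char) (hl : l1.length = l2.length) :
    pvALoop l1 l2 true = decide (l1 = l2) := by
  induction l1 generalizing l2 with
  | nil => cases l2 with
    | nil => simp [pvALoop]
    | cons c2 t2 => simp at hl
  | cons c1 t1 ih =>
    cases l2 with
    | nil => simp at hl
    | cons c2 t2 =>
      simp only [List.length_cons, Nat.add_right_cancel_iff] at hl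
      by_cases h : c1 = c2 <;> simp [pvALoop, h, ih _ hl]

-- with the flag clear, A's loop computes B's first-mismatch-then-suffix answer
theorem pvALoop_false (l1 l2 : List Char) (hl : l1.length = l2.length) :
    pvALoop l1 l2 false =
      (match pvFirstMismatch l1 l2 with
       | none => false
       | some i => decide (l1.drop (i + 1) = l2.drop (i + 1))) := by
  induction l1 generalizing l2 with
  | nil => cases l2 <;> simp [pvALoop, pvFirstMismatch]
  | cons c1 t1 ih =>
    cases l2 with
    | nil => simp at hl
    | cons c2 t2 =>
      simp only [List.length_cons, Nat.add_right_cancel_iff] at hl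
      by_cases h : c1 = c2
      · simp only [pvALoop, pvFirstMismatch, h, ne_eq, not_true_eq_false, if_false, ih _ hl]
        cases pvFirstMismatch t1 t2 <;> simp
      · simp [pvALoop, pvFirstMismatch, h, pvALoop_true _ _ hl]

-- ===== VERDICT (by name: the statement is the Claim_ definition above) =====
theorem diffByOne_spec : Claim_equal_diffByOne := by
  intro s1 s2 _
  unfold Spec_diffByOne diffByOne diffByOne_alt
  by_cases h : s1.toList.length = s2.toList.length
  · simp only [h, ne_eq, not_true_eq_false, if_false, pvALoop_false _ _ h]
  · rw [if_pos h, if_pos h]
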